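-- pv_equiv track=rewrite | github.com/jdavidguerrero/intelligent-assistant-platform | core/music_theory/voicing 2.py | _parallel_fifth_count
-- ===== SOURCE A (Python) =====
-- def _parallel_fifth_count(
--     prev: tuple[int, ...],
--     curr: tuple[int, ...],
-- ) -> int:
--     """Count parallel perfect fifth motion between two voicings.
--
--     A parallel fifth occurs when two pairs of voices move in the same
--     direction and maintain a perfect-fifth interval (7 semitones).
--
--     Args:
--         prev: Previous chord MIDI pitches (sorted)
--         curr: Current chord MIDI pitches (sorted)
--
--     Returns:
--         Number of parallel-fifth pairs detected.
--     """
--     if len(prev) != len(curr):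
--         return 0
--
--     count = 0
--     n = len(prev)
--     for i in range(n):
--         for j in range(i + 1, n):
--             prev_interval = (prev[j] - prev[i]) % 12
--             curr_interval = (curr[j] - curr[i]) % 12
--             if prev_interval == 7 and curr_interval == 7:
--                 # Same fifth interval — check for parallel motion
--                 motion_i = curr[i] - prev[i]
--                 motion_j = curr[j] - prev[j]
--                 if motion_i != 0 and motion_j != 0 and (motion_i > 0) == (motion_j > 0):
--                     count += 1
--     return count
-- ===== SOURCE B (Python) =====
-- def _parallel_fifth_count(
--     prev: tuple[int, ...],
--     curr: tuple[int, ...],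
-- ) -> int:
--     """Count parallel perfect fifths in one pass with a hash map.
--
--     For each voice k, its class is (prev[k] % 12, curr[k] % 12, sign of its
--     motion).  A later voice j forms a parallel fifth with an earlier voice i
--     exactly when i's class is ((prev[j] - 7) % 12, (curr[j] - 7) % 12, sign_j)
--     with sign_j nonzero, so a single left-to-right pass with a counter dict
--     of classes seen so far counts all pairs.
--     """
--     if len(prev) != len(curr):
--         return 0
--
--     count = 0
--     seen: dict[tuple[int, int, int], int] = {}
--     for p, c in zip(prev, curr):
--         m = c - p
--         s = 1 if m > 0 else (-1 if m < 0 else 0)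
--         if s != 0:
--             count += seen.get(((p - 7) % 12, (c - 7) % 12, s), 0)
--         key = (p % 12, c % 12, s)
--         seen[key] = seen.get(key, 0) + 1
--     return count
-- ===== Notes on version B (the rewrite author's own statement) =====
-- stated objective: faster
-- what changed: Replaced the O(n^2) all-pairs scan with a single left-to-right pass over zip(prev, curr) that keeps a dict counting classes (prev%12, curr%12, motion sign) seen so far and, for each voice, adds the count of the complementary (-7 mod 12, -7 mod 12, same sign) class.
import Mathlib
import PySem

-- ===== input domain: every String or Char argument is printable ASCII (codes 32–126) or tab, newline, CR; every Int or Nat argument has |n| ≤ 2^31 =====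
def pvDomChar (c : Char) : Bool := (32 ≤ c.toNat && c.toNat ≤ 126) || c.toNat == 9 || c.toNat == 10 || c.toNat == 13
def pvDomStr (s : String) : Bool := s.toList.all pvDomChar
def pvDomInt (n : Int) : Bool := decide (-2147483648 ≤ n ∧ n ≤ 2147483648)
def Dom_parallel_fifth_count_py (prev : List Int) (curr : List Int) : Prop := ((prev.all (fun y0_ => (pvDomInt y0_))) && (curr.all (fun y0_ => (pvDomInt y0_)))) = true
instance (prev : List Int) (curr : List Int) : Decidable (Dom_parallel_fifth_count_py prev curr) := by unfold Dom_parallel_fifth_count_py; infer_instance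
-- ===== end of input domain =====

-- B replaces A's quadratic pair scan by a single pass with a counter dict keyed by
-- (pitch class, pitch class, motion sign), looking up the complementary fifth key (objective: faster).


-- ===== PORT A =====
def parallel_fifth_count_py (prev : List Int) (curr : List Int) : Int :=
  if prev.length ≠ curr.length then 0
  else
    let n : Int := prev.length
    (PySem.List.pyRange 0 n 1).foldl (fun count i =>
      (PySem.List.pyRange (i + 1) n 1).foldl (fun count j =>
        let prev_interval := PySem.Int.mod (PySem.List.pyGetD prev j 0 - PySem.List.pyGetD prev i 0) 12
        let curr_interval := PySem.Int.mod (PySem.List.pyGetD curr j 0 - PySem.List.pyGetD curr i 0) 12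
        if prev_interval = 7 ∧ curr_interval = 7 then
          let motion_i := PySem.List.pyGetD curr i 0 - PySem.List.pyGetD prev i 0
          let motion_j := PySem.List.pyGetD curr j 0 - PySem.List.pyGetD prev j 0
          if motion_i ≠ 0 ∧ motion_j ≠ 0 ∧ (0 < motion_i ↔ 0 < motion_j) then count + 1
          else count
        else count) count) 0

-- ===== PORT B =====
def parallel_fifth_count_py_alt (prev : List Int) (curr : List Int) : Int :=
  if prev.length ≠ curr.length then 0
  else
    let st := (prev.zip curr).foldl
      (fun (st : Int × PySem.Dict (Int × Int × Int) Int) pc =>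
        let p := pc.1
        let c := pc.2
        let m := c - p
        let s : Int := if 0 < m then 1 else if m < 0 then -1 else 0
        let count :=
          if s ≠ 0 then
            st.1 + st.2.getD (PySem.Int.mod (p - 7) 12, PySem.Int.mod (c - 7) 12, s) 0
          else st.1
        let key := (PySem.Int.mod p 12, PySem.Int.mod c 12, s)
        (count, st.2.insert key (st.2.getD key 0 + 1)))
      (0, PySem.Dict.empty)
    st.1

-- ===== PRECONDITION & SPEC =====
def Spec_parallel_fifth_count_py (prev : List Int) (curr : List Int) (out : Int) : Prop := out = parallel_fifth_count_py_alt prev curr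
instance (prev : List Int) (curr : List Int) (out : Int) : Decidable (Spec_parallel_fifth_count_py prev curr out) := by unfold Spec_parallel_fifth_count_py; infer_instance

-- ===== CLAIM (what is proved, stated in full; the proofs are below) =====
def Claim_equal_parallel_fifth_count_py : Prop := ∀ (prev : List Int) (curr : List Int), Dom_parallel_fifth_count_py prev curr → Spec_parallel_fifth_count_py prev curr (parallel_fifth_count_py prev curr)

-- ===== LEMMAS AND PROOFS =====

-- the parallel-fifth predicate on two voices a = (prev_i, curr_i), b = (prev_j, curr_j), i before j
def pvP (a b : Int × Int) : Bool :=
  decide (PySem.Int.mod (b.1 - a.1) 12 = 7 ∧ PySem.Int.mod (b.2 - a.2) 12 = 7 ∧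
    ((0 < a.2 - a.1 ∧ 0 < b.2 - b.1) ∨ (a.2 - a.1 < 0 ∧ b.2 - b.1 < 0)))

def pvSign (a : Int × Int) : Int :=
  if 0 < a.2 - a.1 then 1 else if a.2 - a.1 < 0 then -1 else 0

def pvKey (a : Int × Int) : Int × Int × Int :=
  (PySem.Int.mod a.1 12, PySem.Int.mod a.2 12, pvSign a)

def pvLKey (b : Int × Int) : Int × Int × Int :=
  (PySem.Int.mod (b.1 - 7) 12, PySem.Int.mod (b.2 - 7) 12, pvSign b)

-- B's loop step (definitionally the step lambda of the port of B)
def pvStep (st : Int × PySem.Dict (Int × Int × Int) Int) (pc : Int × Int) :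
    Int × PySem.Dict (Int × Int × Int) Int :=
  let p := pc.1
  let c := pc.2
  let m := c - p
  let s : Int := if 0 < m then 1 else if m < 0 then -1 else 0
  let count :=
    if s ≠ 0 then
      st.1 + st.2.getD (PySem.Int.mod (p - 7) 12, PySem.Int.mod (c - 7) 12, s) 0
    else st.1
  let key := (PySem.Int.mod p 12, PySem.Int.mod c 12, s)
  (count, st.2.insert key (st.2.getD key 0 + 1))

-- A's inner-loop body (definitionally the inner lambda of the port of A, with
-- voice i's pitches pi, ci already read off)
def pvInnerF (prev curr : List Int) (pi ci : Int) (count : Int) (j : Int) : Int :=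
  if PySem.Int.mod (PySem.List.pyGetD prev j 0 - pi) 12 = 7 ∧
     PySem.Int.mod (PySem.List.pyGetD curr j 0 - ci) 12 = 7 then
    if ci - pi ≠ 0 ∧ PySem.List.pyGetD curr j 0 - PySem.List.pyGetD prev j 0 ≠ 0 ∧
       (0 < ci - pi ↔ 0 < PySem.List.pyGetD curr j 0 - PySem.List.pyGetD prev j 0) then count + 1
    else count
  else count

-- A's outer-loop body (definitionally the outer lambda of the port of A)
def pvOuterF (prev curr : List Int) (count : Int) (i : Int) : Int :=
  (PySem.List.pyRange (i + 1) ((prev.length : Nat) : Int) 1).foldl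
    (pvInnerF prev curr (PySem.List.pyGetD prev i 0) (PySem.List.pyGetD curr i 0)) count

-- A's count as structural recursion: each voice counts partners after it
def pvACount : List (Int × Int) → Int
  | [] => 0
  | a :: t => (t.countP (fun b => pvP a b) : Int) + pvACount t

-- B's count: each voice counts partners before it (ps = voices already processed)
def pvBCount : List (Int × Int) → List (Int × Int) → Int
  | _, [] => 0
  | ps, b :: t => (ps.countP (fun a => pvP a b) : Int) + pvBCount (ps ++ [b]) t

lemma pvKey_eq_iff (a b : Int × Int) (hs : pvSign b ≠ 0) :
    (pvKey a = pvLKey b) ↔ pvP a b = true := by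
  have e12 : (0:Int) < 12 := by norm_num
  simp only [pvSign] at hs
  simp only [pvKey, pvLKey, pvP, pvSign, Prod.mk.injEq, decide_eq_true_eq,
    PySem.Int.mod_eq_emod_of_pos e12]
  constructor
  · rintro ⟨h1, h2, h3⟩
    refine ⟨by omega, by omega, ?_⟩
    split_ifs at h3 hs <;> omega
  · rintro ⟨h1, h2, h3⟩
    refine ⟨by omega, by omega, ?_⟩
    split_ifs <;> omega

lemma pvP_false_of_sign_zero (a b : Int × Int) (hs : pvSign b = 0) : pvP a b = false := by
  simp only [pvSign] at hs
  simp only [pvP, decide_eq_false_iff_not, not_and]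
  split_ifs at hs <;> omega

-- the motion test as A writes it is the sign disjunction pvP carries
lemma pvCond_iff (mi mj : Int) :
    (mi ≠ 0 ∧ mj ≠ 0 ∧ (0 < mi ↔ 0 < mj)) ↔ ((0 < mi ∧ 0 < mj) ∨ (mi < 0 ∧ mj < 0)) := by
  constructor
  · rintro ⟨h1, h2, h3⟩
    rcases lt_or_gt_of_ne h2 with h | h
    · exact Or.inr ⟨by omega, h⟩
    · exact Or.inl ⟨h3.mpr h, h⟩
  · rintro (⟨h1, h2⟩ | ⟨h1, h2⟩) <;> exact ⟨by omega, by omega, by constructor <;> intro <;> omega⟩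

-- A's inner-loop body, evaluated on the four pitches, is a 0/1 test of pvP
lemma pvBody_eval (pi ci pk ck cnt : Int) :
    (if PySem.Int.mod (pk - pi) 12 = 7 ∧ PySem.Int.mod (ck - ci) 12 = 7 then
       (if ci - pi ≠ 0 ∧ ck - pk ≠ 0 ∧ (0 < ci - pi ↔ 0 < ck - pk) then cnt + 1 else cnt)
     else cnt)
    = cnt + (if pvP (pi, ci) (pk, ck) = true then 1 else 0) := by
  simp only [pvP, decide_eq_true_eq]
  by_cases h1 : PySem.Int.mod (pk - pi) 12 = 7 ∧ PySem.Int.mod (ck - ci) 12 = 7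
  · by_cases h2 : ci - pi ≠ 0 ∧ ck - pk ≠ 0 ∧ (0 < ci - pi ↔ 0 < ck - pk)
    · rw [if_pos h1, if_pos h2, if_pos ⟨h1.1, h1.2, (pvCond_iff _ _).mp h2⟩]
    · rw [if_pos h1, if_neg h2, if_neg (by rintro ⟨_, _, hd⟩; exact h2 ((pvCond_iff _ _).mpr hd)),
        add_zero]
  · rw [if_neg h1, if_neg (by rintro ⟨hm1, hm2, _⟩; exact h1 ⟨hm1, hm2⟩), add_zero]

-- B's loop invariant: the dict is the counter of the keys of the processed prefix
lemma pvB_loop (l : List (Int × Int)) : ∀ (ps : List (Int × Int)) (cnt : Int),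
    (l.foldl pvStep
      (cnt, (ps.map pvKey).foldl (fun d k => d.insert k (d.getD k 0 + 1)) PySem.Dict.empty)).1
    = cnt + pvBCount ps l := by
  induction l with
  | nil => intro ps cnt; simp [pvBCount]
  | cons b t ih =>
    intro ps cnt
    rw [List.foldl_cons]
    have hcnt : (if pvSign b ≠ 0 then
          cnt + ((ps.map pvKey).foldl (fun d k => d.insert k (d.getD k 0 + 1))
            PySem.Dict.empty).getD (pvLKey b) 0
        else cnt) = cnt + (ps.countP (fun a => pvP a b) : Int) := by
      have hD : ((ps.map pvKey).foldl (fun d k => d.insert k (d.getD k 0 + 1))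
            PySem.Dict.empty).getD (pvLKey b) 0 = ((ps.map pvKey).count (pvLKey b) : Int) := by
        rw [PySem.Dict.foldl_insert_getD_add_one_eq_counter, PySem.Dict.getD_counter]
      by_cases hs : pvSign b = 0
      · have hz : ps.countP (fun a => pvP a b) = 0 := by
          rw [List.countP_eq_zero]
          intro a _
          simp [pvP_false_of_sign_zero a b hs]
        simp [hs, hz]
      · rw [if_pos hs, hD]
        congr 1
        rw [List.count_eq_countP, List.countP_map]
        norm_cast
        apply List.countP_congr
        intro a _
        simp only [Function.comp]
        constructor
        · intro h
          have hk : pvKey a = pvLKey b := by simpa using h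
          simpa using (pvKey_eq_iff a b hs).mp hk
        · intro h
          have hk : pvKey a = pvLKey b := (pvKey_eq_iff a b hs).mpr (by simpa using h)
          simpa using hk
    have hdict : ((ps.map pvKey).foldl
          (fun (d : PySem.Dict (Int × Int × Int) Int) k => d.insert k (d.getD k 0 + 1))
          PySem.Dict.empty).insert (pvKey b)
          (((ps.map pvKey).foldl (fun d k => d.insert k (d.getD k 0 + 1))
            PySem.Dict.empty).getD (pvKey b) 0 + 1)
        = ((ps ++ [b]).map pvKey).foldl (fun d k => d.insert k (d.getD k 0 + 1))
            PySem.Dict.empty := by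
      rw [List.map_append, List.foldl_append]
      rfl
    have hstep : pvStep
        (cnt, (ps.map pvKey).foldl (fun d k => d.insert k (d.getD k 0 + 1)) PySem.Dict.empty) b
        = (cnt + (ps.countP (fun a => pvP a b) : Int),
           ((ps ++ [b]).map pvKey).foldl (fun d k => d.insert k (d.getD k 0 + 1))
             PySem.Dict.empty) := by
      have h0 : pvStep
          (cnt, (ps.map pvKey).foldl (fun d k => d.insert k (d.getD k 0 + 1)) PySem.Dict.empty) b
          = (if pvSign b ≠ 0 then
               cnt + ((ps.map pvKey).foldl (fun d k => d.insert k (d.getD k 0 + 1))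
                 PySem.Dict.empty).getD (pvLKey b) 0
             else cnt,
             ((ps.map pvKey).foldl (fun d k => d.insert k (d.getD k 0 + 1))
               PySem.Dict.empty).insert (pvKey b)
               (((ps.map pvKey).foldl (fun d k => d.insert k (d.getD k 0 + 1))
                 PySem.Dict.empty).getD (pvKey b) 0 + 1)) := rfl
      rw [h0, hcnt]
      exact congrArg _ hdict
    rw [hstep, ih (ps ++ [b]) (cnt + (ps.countP (fun a => pvP a b) : Int))]
    show _ = cnt + pvBCount ps (b :: t)
    simp [pvBCount, add_assoc]

-- A's inner loop over j from index k: a countP of pvP partners of the voice (pi, ci)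
lemma pvA_inner_core (prev curr : List Int) (hn : prev.length = curr.length) (pi ci : Int) :
    ∀ (d k : Nat), prev.length - k = d → ∀ (cnt : Int),
    ((PySem.List.pyRange ((k : Nat) : Int) ((prev.length : Nat) : Int) 1).foldl
      (pvInnerF prev curr pi ci) cnt)
    = cnt + (((prev.zip curr).drop k).countP (fun b => pvP (pi, ci) b) : Int) := by
  have hlen : (prev.zip curr).length = prev.length := by
    rw [List.length_zip, hn, min_self]
  intro d
  induction d with
  | zero =>
    intro k hk cnt
    have hnk : prev.length ≤ k := by omega
    rw [PySem.List.pyRange_one_eq_nil (by exact_mod_cast hnk), List.foldl_nil,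
      List.drop_eq_nil_of_le (by omega : (prev.zip curr).length ≤ k)]
    simp
  | succ d ih =>
    intro k hk cnt
    have hklt : k < prev.length := by omega
    have hkc : k < curr.length := by omega
    rw [PySem.List.pyRange_one_cons (by exact_mod_cast hklt), List.foldl_cons]
    have hini : pvInnerF prev curr pi ci cnt ((k : Nat) : Int)
        = cnt + (if pvP (pi, ci) (prev[k]'hklt, curr[k]'hkc) = true then 1 else 0) := by
      simp only [pvInnerF, PySem.List.pyGetD_natCast]
      rw [List.getD_eq_getElem prev 0 hklt, List.getD_eq_getElem curr 0 hkc]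
      exact pvBody_eval pi ci _ _ cnt
    rw [hini]
    rw [show ((k : Int) + 1) = (((k + 1 : Nat) : Nat) : Int) by push_cast; ring]
    rw [ih (k + 1) (by omega)]
    have hzk : k < (prev.zip curr).length := by omega
    rw [List.drop_eq_getElem_cons hzk]
    simp only [List.countP_cons, List.getElem_zip]
    by_cases hp : pvP (pi, ci) (prev[k]'hklt, curr[k]'hkc) = true
    · simp only [hp, if_true]
      push_cast
      ring
    · simp only [hp]
      push_cast
      ring

-- A's outer loop from index k onward computes pvACount of the dropped zip
lemma pvA_outer_core (prev curr : List Int) (hn : prev.length = curr.length) :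
    ∀ (d k : Nat), prev.length - k = d → ∀ (cnt : Int),
    ((PySem.List.pyRange ((k : Nat) : Int) ((prev.length : Nat) : Int) 1).foldl
      (pvOuterF prev curr) cnt)
    = cnt + pvACount ((prev.zip curr).drop k) := by
  have hlen : (prev.zip curr).length = prev.length := by
    rw [List.length_zip, hn, min_self]
  intro d
  induction d with
  | zero =>
    intro k hk cnt
    have hnk : prev.length ≤ k := by omega
    rw [PySem.List.pyRange_one_eq_nil (by exact_mod_cast hnk), List.foldl_nil,
      List.drop_eq_nil_of_le (by omega : (prev.zip curr).length ≤ k)]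
    simp [pvACount]
  | succ d ih =>
    intro k hk cnt
    have hklt : k < prev.length := by omega
    have hkc : k < curr.length := by omega
    rw [PySem.List.pyRange_one_cons (by exact_mod_cast hklt), List.foldl_cons]
    have hini : pvOuterF prev curr cnt ((k : Nat) : Int)
        = cnt + (((prev.zip curr).drop (k + 1)).countP
            (fun b => pvP (prev[k]'hklt, curr[k]'hkc) b) : Int) := by
      simp only [pvOuterF, PySem.List.pyGetD_natCast]
      rw [List.getD_eq_getElem prev 0 hklt, List.getD_eq_getElem curr 0 hkc]
      rw [show ((k : Int) + 1) = (((k + 1 : Nat) : Nat) : Int) by push_cast; ring]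
      exact pvA_inner_core prev curr hn _ _ (prev.length - (k + 1)) (k + 1) (by omega) cnt
    rw [hini]
    rw [show ((k : Int) + 1) = (((k + 1 : Nat) : Nat) : Int) by push_cast; ring]
    rw [ih (k + 1) (by omega)]
    have hzk : k < (prev.zip curr).length := by omega
    rw [List.drop_eq_getElem_cons hzk]
    simp only [pvACount, List.getElem_zip]
    ring

-- the outer fold of the port of A, written with its own lambdas, is pvOuterF's fold
lemma pvA_outer (prev curr : List Int) (hn : prev.length = curr.length) (cnt : Int) :
    ((PySem.List.pyRange ((0 : Nat) : Int) ((prev.length : Nat) : Int) 1).foldl (fun count i =>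
      (PySem.List.pyRange (i + 1) ((prev.length : Nat) : Int) 1).foldl (fun count j =>
        let prev_interval := PySem.Int.mod (PySem.List.pyGetD prev j 0 - PySem.List.pyGetD prev i 0) 12
        let curr_interval := PySem.Int.mod (PySem.List.pyGetD curr j 0 - PySem.List.pyGetD curr i 0) 12
        if prev_interval = 7 ∧ curr_interval = 7 then
          let motion_i := PySem.List.pyGetD curr i 0 - PySem.List.pyGetD prev i 0
          let motion_j := PySem.List.pyGetD curr j 0 - PySem.List.pyGetD prev j 0
          if motion_i ≠ 0 ∧ motion_j ≠ 0 ∧ (0 < motion_i ↔ 0 < motion_j) then count + 1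
          else count
        else count) count) cnt)
    = cnt + pvACount (prev.zip curr) := by
  have h := pvA_outer_core prev curr hn prev.length 0 (by omega) cnt
  simp only [List.drop_zero] at h
  exact h

lemma pvBCount_eq (l : List (Int × Int)) : ∀ (ps : List (Int × Int)),
    pvBCount ps l = pvACount l + (l.map (fun b => (ps.countP (fun a => pvP a b) : Int))).sum := by
  induction l with
  | nil => intro ps; simp [pvBCount, pvACount]
  | cons b t ih =>
    intro ps
    show (ps.countP (fun a => pvP a b) : Int) + pvBCount (ps ++ [b]) t
      = ((t.countP (fun x => pvP b x) : Int) + pvACount t) + _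
    rw [ih (ps ++ [b])]
    have hpt : (t.map (fun x => ((ps ++ [b]).countP (fun a => pvP a x) : Int)))
        = t.map (fun x => (ps.countP (fun a => pvP a x) : Int) + (if pvP b x then 1 else 0)) := by
      apply List.map_congr_left
      intro x _
      rw [List.countP_append]
      push_cast
      congr 1
      rw [List.countP_cons, List.countP_nil]
      split_ifs <;> simp
    rw [hpt, PySem.List.sum_map_add_int, PySem.List.sum_map_ite_one_zero]
    simp only [List.map_cons, List.sum_cons]
    ring

lemma pvACount_eq_pvBCount (l : List (Int × Int)) : pvACount l = pvBCount [] l := by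
  rw [pvBCount_eq l []]
  simp

-- ===== VERDICT (by name: the statement is the Claim_ definition above) =====
theorem parallel_fifth_count_py_spec : Claim_equal_parallel_fifth_count_py := by
  intro prev curr _
  unfold Spec_parallel_fifth_count_py parallel_fifth_count_py_alt parallel_fifth_count_py
  by_cases hn : prev.length = curr.length
  · simp only [hn, ne_eq, not_true_eq_false, if_false]
    rw [← hn]
    have hA := pvA_outer prev curr hn 0
    rw [zero_add] at hA
    simp only [ne_eq, Nat.cast_zero] at hA
    rw [hA, pvACount_eq_pvBCount]
    have hB := pvB_loop (prev.zip curr) [] 0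
    simp only [List.map_nil, List.foldl_nil, zero_add] at hB
    exact hB.symm
  · simp [hn]
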